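-- pv_equiv track=rewrite | github.com/robopol/Collatz-conjucture | final_check_collatz.py | p_vectors_by_combinations
-- ===== SOURCE A (Python) =====
-- import itertools
-- from typing import List, Tuple, Iterable, Optional
--
-- def p_vectors_by_combinations(a: int, t: int, limit: Optional[int] = None) -> Iterable[Tuple[int, ...]]:
--     count = 0
--     for ones_positions in itertools.combinations(range(a), t):
--         p = [2] * a
--         for pos in ones_positions:
--             p[pos] = 1
--         yield tuple(p)
--         count += 1
--         if limit is not None and count >= limit:
--             break
-- ===== SOURCE B (Python) =====
-- from typing import Iterable, Tuple, Optional
--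
--
-- def p_vectors_by_combinations(a: int, t: int, limit: Optional[int] = None) -> Iterable[Tuple[int, ...]]:
--     if t < 0:
--         raise ValueError("r must be non-negative")
--     # explicit-stack DFS over positions: each frame (i, r, prefix) means
--     # positions < i are decided in prefix and r ones remain to place.
--     # The 1-branch is pushed last so it is popped first, which gives
--     # itertools' lexicographic order of the chosen positions.
--     count = 0
--     stack = [(0, t, [])]
--     while stack:
--         i, r, prefix = stack.pop()
--         if r == 0:
--             yield tuple(prefix + [2] * (a - i))
--             count += 1
--             if limit is not None and count >= limit:
--                 return
--         elif a - i >= r: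
--             stack.append((i + 1, r, prefix + [2]))
--             stack.append((i + 1, r - 1, prefix + [1]))
-- ===== Notes on version B (the rewrite author's own statement) =====
-- stated objective: alternative
-- what changed: Replaces itertools.combinations of index tuples plus per-tuple assignment into a fresh [2]*a list by an iterative explicit-stack DFS that decides 1-or-2 position by position and emits completed vectors in the same lexicographic order.
import Mathlib
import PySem

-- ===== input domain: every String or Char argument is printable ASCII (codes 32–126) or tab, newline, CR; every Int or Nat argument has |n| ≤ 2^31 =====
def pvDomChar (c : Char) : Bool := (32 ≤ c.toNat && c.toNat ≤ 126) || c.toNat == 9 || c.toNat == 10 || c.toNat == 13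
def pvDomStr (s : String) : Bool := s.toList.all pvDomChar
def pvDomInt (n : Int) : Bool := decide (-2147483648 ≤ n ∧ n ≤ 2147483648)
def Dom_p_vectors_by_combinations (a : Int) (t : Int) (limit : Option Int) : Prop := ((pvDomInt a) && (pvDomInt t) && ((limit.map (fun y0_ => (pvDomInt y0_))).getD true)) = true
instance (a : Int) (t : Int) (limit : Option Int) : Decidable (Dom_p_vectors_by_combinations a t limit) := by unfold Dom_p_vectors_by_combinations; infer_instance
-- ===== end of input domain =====

-- B replaces itertools.combinations + per-tuple assignment by an iterative explicit-stack DFS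
-- over positions deciding 1/2, same lexicographic order (alternative decomposition, no speed claim).
-- Both Pythons are generators consumed with a count/limit early exit; each port threads the
-- corresponding (output, count) state exactly as the lazy loop runs.


-- ===== PORT A =====
-- 'p = [2]*a; for pos in ones_positions: p[pos] = 1' (positions are in range(a), hence in bounds)
def pvSetOnes (p : List Int) (c : List Int) : List Int :=
  c.foldl (fun p pos => p.set pos.toNat 1) p

-- the loop body: build p from the combination, yield it, count += 1, compute the break flag
def pvStep (a : Int) (limit : Option Int) (st : List (List Int) × Int × Bool) (chosen : List Int) : List (List Int) × Int × Bool :=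
  let p := pvSetOnes (List.replicate a.toNat 2) chosen
  (st.1 ++ [p], st.2.1 + 1, match limit with | some l => decide (st.2.1 + 1 ≥ l) | none => false)

-- itertools.combinations(xs, n) walked lazily in lexicographic order, each emitted
-- combination fed to the loop body; stops once the break flag (st.2.2) is set, and
-- returns immediately when r exceeds the pool length (itertools' documented fast path)
def pvGenA (a : Int) (limit : Option Int) : List Int → Nat → List Int → (List (List Int) × Int × Bool) → (List (List Int) × Int × Bool)
  | _, 0, chosen, st => if st.2.2 then st else pvStep a limit st chosen
  | [], _ + 1, _, st => st
  | x :: xs, n + 1, chosen, st =>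
      if st.2.2 then st
      else if xs.length + 1 < n + 1 then st
      else pvGenA a limit xs (n + 1) chosen (pvGenA a limit xs n (chosen ++ [x]) st)

def p_vectors_by_combinations (a : Int) (t : Int) (limit : Option Int) : List (List Int) :=
  (pvGenA a limit (PySem.List.pyRange 0 a 1) t.toNat [] ([], 0, false)).1

-- ===== PORT B =====
-- Source B's while-loop over the explicit stack; a frame (slots, r, pre) is Source B's
-- (i, r, pre) with slots = a - i (taken as Nat: t < 0 raises, and so is outside Pre_;
-- hence every reachable r is ≥ 0 and slots never needs to go negative).
-- The state st is (yielded output, count); the loop returns as soon as count ≥ limit.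
def pvStackB (limit : Option Int) : List (Nat × Nat × List Int) → (List (List Int) × Int) → List (List Int) × Int
  | [], st => st
  | (slots, 0, pre) :: rest, st =>
      let out := st.1 ++ [pre ++ List.replicate slots 2]
      let c := st.2 + 1
      if (match limit with | some l => decide (c ≥ l) | none => false) then (out, c)
      else pvStackB limit rest (out, c)
  | (slots, r + 1, pre) :: rest, st =>
      if slots < r + 1 then pvStackB limit rest st
      else pvStackB limit ((slots - 1, r, pre ++ [1]) :: (slots - 1, r + 1, pre ++ [2]) :: rest) st
termination_by frames => (frames.map (fun f => 3 ^ f.1)).sum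
decreasing_by
  · have h1 : 1 ≤ 3 ^ slots := Nat.one_le_pow _ _ (by omega)
    simp only [List.map_cons, List.sum_cons]
    omega
  · have h1 : 1 ≤ 3 ^ slots := Nat.one_le_pow _ _ (by omega)
    simp only [List.map_cons, List.sum_cons]
    omega
  · have hs : 1 ≤ slots := by omega
    have hp : 3 ^ slots = 3 ^ (slots - 1) * 3 := by
      rw [← pow_succ]
      congr 1
      omega
    simp only [List.map_cons, List.sum_cons]
    have h1 : 1 ≤ 3 ^ (slots - 1) := Nat.one_le_pow _ _ (by omega)
    omega

def p_vectors_by_combinations_alt (a : Int) (t : Int) (limit : Option Int) : List (List Int) :=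
  (pvStackB limit [(a.toNat, t.toNat, [])] ([], 0)).1

-- ===== PRECONDITION & SPEC =====
-- Pre_ excludes t < 0, on which itertools.combinations (and B alike) raises ValueError.
def Pre_p_vectors_by_combinations (a : Int) (t : Int) (limit : Option Int) : Prop := 0 ≤ t
instance (a : Int) (t : Int) (limit : Option Int) : Decidable (Pre_p_vectors_by_combinations a t limit) := by unfold Pre_p_vectors_by_combinations; infer_instance
def pvWitness_p_vectors_by_combinations : Int × Int × Option Int := (4, 2, some 3)

def Spec_p_vectors_by_combinations (a : Int) (t : Int) (limit : Option Int) (out : List (List Int)) : Prop := out = p_vectors_by_combinations_alt a t limit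
instance (a : Int) (t : Int) (limit : Option Int) (out : List (List Int)) : Decidable (Spec_p_vectors_by_combinations a t limit out) := by unfold Spec_p_vectors_by_combinations; infer_instance

-- ===== CLAIM (what is proved, stated in full; the proofs are below) =====
def Claim_equal_p_vectors_by_combinations : Prop := ∀ (a : Int) (t : Int) (limit : Option Int), Dom_p_vectors_by_combinations a t limit → Pre_p_vectors_by_combinations a t limit → Spec_p_vectors_by_combinations a t limit (p_vectors_by_combinations a t limit)

-- ===== LEMMAS AND PROOFS =====

-- eager itertools.combinations (proof-side model of A's enumeration order)
def pvCombos : List Int → Nat → List (List Int)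
  | _, 0 => [[]]
  | [], _ + 1 => []
  | x :: xs, n + 1 => (pvCombos xs n).map (fun c => x :: c) ++ pvCombos xs (n + 1)

-- eager vectors produced below one stack frame (proof-side model of B's order)
def pvVecsAcc : Nat → Nat → List Int → List (List Int)
  | slots, 0, acc => [acc ++ List.replicate slots 2]
  | 0, _ + 1, _ => []
  | s + 1, r + 1, acc =>
      if s + 1 < r + 1 then []
      else pvVecsAcc s r (acc ++ [1]) ++ pvVecsAcc s (r + 1) (acc ++ [2])

-- the consumer loop with early-exit flag (proof-side)
def pvYieldB (limit : Option Int) (st : List (List Int) × Int × Bool) (v : List Int) : List (List Int) × Int × Bool :=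
  (st.1 ++ [v], st.2.1 + 1, match limit with | some l => decide (st.2.1 + 1 ≥ l) | none => false)

def pvRun (f : (List (List Int) × Int × Bool) → List Int → (List (List Int) × Int × Bool)) :
    (List (List Int) × Int × Bool) → List (List Int) → (List (List Int) × Int × Bool)
  | st, [] => st
  | st, c :: cs => if st.2.2 then st else pvRun f (f st c) cs

theorem pvRun_done (f) (st : List (List Int) × Int × Bool) (cs : List (List Int))
    (h : st.2.2 = true) : pvRun f st cs = st := by
  cases cs with
  | nil => rfl
  | cons c cs => simp [pvRun, h]

theorem pvRun_append (f) (st : List (List Int) × Int × Bool) (l1 l2 : List (List Int)) :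
    pvRun f st (l1 ++ l2) = pvRun f (pvRun f st l1) l2 := by
  induction l1 generalizing st with
  | nil => rfl
  | cons c l1 ih =>
      by_cases h : st.2.2 = true
      · simp [pvRun, h, pvRun_done f st l2 h]
      · simp only [List.cons_append, pvRun, h, Bool.not_eq_true] at *
        simp [ih]

theorem pvRun_map (f) (g : List Int → List Int) (st : List (List Int) × Int × Bool)
    (cs : List (List Int)) : pvRun f st (cs.map g) = pvRun (fun st c => f st (g c)) st cs := by
  induction cs generalizing st with
  | nil => rfl
  | cons c cs ih => by_cases h : st.2.2 = true <;> simp [pvRun, h, ih]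

theorem pvCombos_short : ∀ (xs : List Int) (n : Nat), xs.length < n → pvCombos xs n = [] := by
  intro xs
  induction xs with
  | nil =>
      intro n h
      match n, h with
      | n + 1, _ => rfl
  | cons x xs ih =>
      intro n h
      match n, h with
      | n + 1, h =>
          have hx : xs.length < n := by simp at h; omega
          simp only [pvCombos]
          rw [ih n hx, ih (n + 1) (by omega)]
          rfl

-- the lazy A-side walk equals the consumer loop over the eager combinations
theorem pvGenA_run (a : Int) (limit : Option Int) :
    ∀ (xs : List Int) (n : Nat) (chosen : List Int) (st : List (List Int) × Int × Bool),
      pvGenA a limit xs n chosen st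
        = pvRun (pvStep a limit) st ((pvCombos xs n).map (fun c => chosen ++ c)) := by
  intro xs
  induction xs with
  | nil =>
      intro n chosen st
      cases n with
      | zero =>
          by_cases h : st.2.2 = true <;> simp [pvGenA, pvCombos, pvRun, h]
      | succ n => by_cases h : st.2.2 = true <;> simp [pvGenA, pvCombos, pvRun]
  | cons x xs ih =>
      intro n chosen st
      cases n with
      | zero =>
          by_cases h : st.2.2 = true <;> simp [pvGenA, pvCombos, pvRun, h]
      | succ n =>
          by_cases h : st.2.2 = true
          · rw [pvRun_done _ _ _ h]; simp [pvGenA, h]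
          · by_cases hlen : xs.length + 1 < n + 1
            · have h1 : pvCombos xs n = [] := pvCombos_short xs n (by omega)
              have h2 : pvCombos xs (n + 1) = [] := pvCombos_short xs (n + 1) (by omega)
              simp [pvGenA, pvCombos, h, hlen, h1, h2, pvRun]
            · simp only [pvGenA, h, if_false, hlen, Bool.false_eq_true]
              simp only [pvCombos, List.map_append, List.map_map, pvRun_append]
              have hm : (pvCombos xs n).map ((fun c => chosen ++ c) ∘ fun c => x :: c)
                  = (pvCombos xs n).map (fun c => (chosen ++ [x]) ++ c) := by
                apply List.map_congr_left
                intro c _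
                simp
              rw [hm, ih n (chosen ++ [x]) st, ih (n + 1) chosen]

theorem pvVecsAcc_nil_of_lt : ∀ (s r : Nat) (acc : List Int), s < r → pvVecsAcc s r acc = [] := by
  intro s
  induction s with
  | zero =>
      intro r acc h
      match r, h with
      | r + 1, _ => rfl
  | succ s ih =>
      intro r acc h
      match r, h with
      | r + 1, h =>
          simp only [pvVecsAcc]
          rw [if_pos (by omega)]

-- the iterative stack walk equals the flag-consumer loop over the eager vectors of its frames
theorem pvStackB_run (limit : Option Int) :
    ∀ (frames : List (Nat × Nat × List Int)) (st : List (List Int) × Int),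
      pvStackB limit frames st
        = ((pvRun (pvYieldB limit) (st.1, st.2, false)
              (frames.flatMap (fun f => pvVecsAcc f.1 f.2.1 f.2.2))).1,
           (pvRun (pvYieldB limit) (st.1, st.2, false)
              (frames.flatMap (fun f => pvVecsAcc f.1 f.2.1 f.2.2))).2.1) := by
  intro frames st
  induction frames, st using pvStackB.induct (limit := limit) with
  | case1 st => simp [pvRun, pvStackB]
  | case2 slots pre rest st c hhit =>
      cases limit with
      | none => simp at hhit
      | some l =>
          have hb : decide (st.2 + 1 ≥ l) = true := hhit
          simp [pvStackB, pvVecsAcc, pvRun, pvYieldB, hb, pvRun_done]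
  | case3 slots pre rest st out c hhit ih =>
      cases limit with
      | none =>
          simp only [pvStackB, List.flatMap_cons, pvVecsAcc, List.singleton_append,
            pvRun, pvYieldB, Bool.false_eq_true, if_false]
          simpa using ih
      | some l =>
          have hb : decide (st.2 + 1 ≥ l) = false := by simpa using hhit
          simp only [pvStackB, List.flatMap_cons, pvVecsAcc, List.singleton_append,
            pvRun, pvYieldB, hb, Bool.false_eq_true, if_false]
          simpa [hb] using ih
  | case4 slots r pre rest st hlt ih =>
      simp only [pvStackB, hlt, if_pos, List.flatMap_cons,
        pvVecsAcc_nil_of_lt slots (r + 1) pre hlt, List.nil_append]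
      exact ih
  | case5 slots r pre rest st hlt ih =>
      obtain ⟨s, rfl⟩ : ∃ s, slots = s + 1 := ⟨slots - 1, by omega⟩
      simp only [pvStackB, hlt]
      rw [ih]
      have hv : pvVecsAcc (s + 1) (r + 1) pre
          = pvVecsAcc s r (pre ++ [1]) ++ pvVecsAcc s (r + 1) (pre ++ [2]) := by
        simp only [pvVecsAcc]
        rw [if_neg hlt]
      simp [hv, List.flatMap_cons]

-- main bridge: combinations of the remaining positions, built into full vectors,
-- equal the recursive 1/2 placement
theorem set_append_len (pre : List Int) (y : Int) (tail : List Int) (v : Int) :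
    (pre ++ y :: tail).set pre.length v = pre ++ v :: tail := by
  induction pre with
  | nil => rfl
  | cons x pre ih => simp [ih]

theorem pvCombos_build_eq_vecs :
    ∀ (s r : Nat) (base : Nat) (pre : List Int), pre.length = base →
      (pvCombos ((List.range' base s).map Int.ofNat) r).map
          (fun c => pvSetOnes (pre ++ List.replicate s 2) c)
        = pvVecsAcc s r pre := by
  intro s
  induction s with
  | zero =>
      intro r base pre hpre
      cases r with
      | zero => simp [pvCombos, pvVecsAcc, pvSetOnes]
      | succ r => simp [pvCombos, pvVecsAcc_nil_of_lt 0 (r + 1) pre (by omega)]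
  | succ s ih =>
      intro r base pre hpre
      cases r with
      | zero => simp [pvCombos, pvVecsAcc, pvSetOnes]
      | succ r =>
          have hrange : (List.range' base (s + 1)).map Int.ofNat
              = (Int.ofNat base) :: (List.range' (base + 1) s).map Int.ofNat := by
            simp [List.range'_succ]
          rw [hrange]
          simp only [pvCombos, List.map_append, List.map_map]
          have hrep : (List.replicate (s + 1) (2 : Int)) = 2 :: List.replicate s 2 := rfl
          have hset1 : (pre ++ List.replicate (s + 1) (2 : Int)).set base 1
              = (pre ++ [1]) ++ List.replicate s 2 := by
            rw [hrep, ← hpre, set_append_len]; simp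
          have h1 : ((pvCombos ((List.range' (base + 1) s).map Int.ofNat) r).map
                ((fun c => pvSetOnes (pre ++ List.replicate (s + 1) 2) c) ∘ fun c => Int.ofNat base :: c))
              = pvVecsAcc s r (pre ++ [1]) := by
            rw [← ih r (base + 1) (pre ++ [1]) (by simp [hpre])]
            apply List.map_congr_left
            intro c _
            simp only [Function.comp]
            show pvSetOnes ((pre ++ List.replicate (s + 1) 2).set (Int.ofNat base).toNat 1) c
                = pvSetOnes ((pre ++ [1]) ++ List.replicate s 2) c
            rw [show (Int.ofNat base).toNat = base from rfl, hset1]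
          have h2 : ((pvCombos ((List.range' (base + 1) s).map Int.ofNat) (r + 1)).map
                (fun c => pvSetOnes (pre ++ List.replicate (s + 1) 2) c))
              = pvVecsAcc s (r + 1) (pre ++ [2]) := by
            rw [← ih (r + 1) (base + 1) (pre ++ [2]) (by simp [hpre])]
            apply List.map_congr_left
            intro c _
            have : pre ++ List.replicate (s + 1) (2 : Int) = (pre ++ [2]) ++ List.replicate s 2 := by
              rw [hrep]; simp
            rw [this]
          rw [h1, h2]
          by_cases hlt : s + 1 < r + 1
          · rw [pvVecsAcc_nil_of_lt _ _ _ hlt,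
              pvVecsAcc_nil_of_lt s r (pre ++ [1]) (by omega),
              pvVecsAcc_nil_of_lt s (r + 1) (pre ++ [2]) (by omega)]
            rfl
          · simp only [pvVecsAcc]
            rw [if_neg hlt]

theorem pyRange_eq_range'_map (a : Int) :
    PySem.List.pyRange 0 a 1 = (List.range' 0 a.toNat).map Int.ofNat := by
  rw [PySem.List.pyRange_one]
  simp [List.range_eq_range']

-- ===== VERDICT (by name: the statement is the Claim_ definition above) =====
theorem p_vectors_by_combinations_spec : Claim_equal_p_vectors_by_combinations := by
  intro a t limit _ _
  show p_vectors_by_combinations a t limit = p_vectors_by_combinations_alt a t limit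
  unfold p_vectors_by_combinations p_vectors_by_combinations_alt
  rw [pvGenA_run, pvStackB_run]
  have hbuild := pvCombos_build_eq_vecs a.toNat t.toNat 0 [] rfl
  simp only [List.nil_append] at hbuild
  rw [pyRange_eq_range'_map]
  simp only [List.flatMap_cons, List.flatMap_nil, List.append_nil]
  calc (pvRun (pvStep a limit) ([], 0, false)
          ((pvCombos ((List.range' 0 a.toNat).map Int.ofNat) t.toNat).map (fun c => [] ++ c))).1
      = (pvRun (pvStep a limit) ([], 0, false)
          (pvCombos ((List.range' 0 a.toNat).map Int.ofNat) t.toNat)).1 := by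
        simp
    _ = (pvRun (pvYieldB limit) ([], 0, false)
          ((pvCombos ((List.range' 0 a.toNat).map Int.ofNat) t.toNat).map
            (fun c => pvSetOnes (List.replicate a.toNat 2) c))).1 := by
        rw [pvRun_map]
        rfl
    _ = (pvRun (pvYieldB limit) ([], 0, false) (pvVecsAcc a.toNat t.toNat [])).1 := by rw [hbuild]
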